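-- pv_equiv track=rewrite | github.com/et22/cuda-connectomics | bfs.py | components_array_to_dictionary
-- ===== SOURCE A (Python) =====
-- def components_array_to_dictionary(components):
--     dictionary = {}
--     for i in range(len(components)):
--         if components[i] in dictionary:
--             dictionary[components[i]].add(i)
--         else:
--             dictionary[components[i]] = {i}
--     return dictionary
-- ===== SOURCE B (Python) =====
-- def components_array_to_dictionary(components):
--     labels = []
--     for c in components:
--         if c not in labels:
--             labels.append(c)
--     return {c: {i for i, x in enumerate(components) if x == c}
--             for c in labels}
-- ===== Notes on version B (the rewrite author's own statement) =====
-- stated objective: alternative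
-- what changed: A buckets indices into a dict in one pass; B first deduplicates the labels in order of first occurrence, then builds each label's index set by a separate enumerate-and-filter comprehension.
import Mathlib
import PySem

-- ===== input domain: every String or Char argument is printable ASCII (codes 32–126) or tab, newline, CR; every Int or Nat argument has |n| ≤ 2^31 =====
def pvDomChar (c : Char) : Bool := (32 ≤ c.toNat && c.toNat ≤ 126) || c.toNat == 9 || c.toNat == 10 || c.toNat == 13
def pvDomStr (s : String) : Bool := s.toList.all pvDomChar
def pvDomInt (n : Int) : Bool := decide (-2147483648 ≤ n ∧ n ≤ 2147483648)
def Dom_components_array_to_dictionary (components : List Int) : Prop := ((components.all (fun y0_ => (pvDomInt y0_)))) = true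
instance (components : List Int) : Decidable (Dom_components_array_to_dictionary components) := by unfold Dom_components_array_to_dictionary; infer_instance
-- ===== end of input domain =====

-- B replaces A's one-pass dict bucketing by an ordered dedup of the labels followed by a
-- per-label enumerate-and-filter set comprehension (objective: alternative decomposition).

-- ===== PORT A =====
-- A: dictionary = {}; for i in range(len(components)): if components[i] in dictionary:
--    dictionary[components[i]].add(i) else: dictionary[components[i]] = {i}; return dictionary
def components_array_to_dictionary (components : List Int) : List (Int × List Int) :=
  ((PySem.List.pyRange 0 (components.length : Int) 1).foldl
    (fun (d : PySem.Dict Int (PySem.Set Int)) i =>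
      match PySem.List.pyGet? components i with
      | some c =>
          if d.contains c then
            d.insert c (PySem.Set.add (d.getD c []) i)   -- dictionary[c].add(i); the set stays at c's slot
          else
            d.insert c [i]                               -- dictionary[c] = {i}
      | none => d)                                       -- unreachable: i ∈ range(len(components))
    PySem.Dict.empty).items

-- ===== PORT B =====
def components_array_to_dictionary_alt (components : List Int) : List (Int × List Int) :=
  let labels : List Int :=
    components.foldl (fun ls c => if ls.contains c then ls else ls ++ [c]) []
  labels.map (fun c =>
    (c, PySem.Set.ofList
          (((PySem.List.enumerate components 0).filter (fun p => p.2 == c)).map (·.1))))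

-- ===== PRECONDITION & SPEC =====
def Spec_components_array_to_dictionary (components : List Int) (out : List (Int × List Int)) : Prop := out = components_array_to_dictionary_alt components
instance (components : List Int) (out : List (Int × List Int)) : Decidable (Spec_components_array_to_dictionary components out) := by unfold Spec_components_array_to_dictionary; infer_instance

-- ===== CLAIM (what is proved, stated in full; the proofs are below) =====
def Claim_equal_components_array_to_dictionary : Prop := ∀ (components : List Int), Dom_components_array_to_dictionary components → Spec_components_array_to_dictionary components (components_array_to_dictionary components)

-- ===== LEMMAS AND PROOFS =====

-- A's loop body, rewritten: the branch on `contains` is exactly `Dict.modify` with default ∅.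
lemma aStep_eq_modify (d : PySem.Dict Int (PySem.Set Int)) (c i : Int) :
    (if d.contains c then d.insert c (PySem.Set.add (d.getD c []) i) else d.insert c [i])
      = d.modify c [] (fun s => PySem.Set.add s i) := by
  by_cases h : d.contains c
  · simp [PySem.Dict.modify, h]
  · have h' : d.contains c = false := by simpa using h
    simp [PySem.Dict.modify, h, PySem.Dict.getD_of_not_contains _ _ h',
      PySem.Set.add, PySem.Set.contains]

lemma getD_mem_values {d : PySem.Dict Int (PySem.Set Int)} {k : Int} (h : d.contains k = true) :
    d.getD k [] ∈ d.values := by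
  rw [PySem.Dict.contains_eq_isSome_get?] at h
  obtain ⟨v, hv⟩ := Option.isSome_iff_exists.mp h
  rw [PySem.Dict.getD_of_get?_eq_some _ _ hv]
  have := PySem.Dict.mem_items_of_get?_eq_some _ hv
  exact List.mem_map.mpr ⟨(k, v), this, rfl⟩

-- While every index appended is fresh for every value of the dict, `Set.add` is plain append.
lemma foldl_modify_add_eq_append (l : List (Int × Int))
    (d : PySem.Dict Int (PySem.Set Int))
    (hn : (l.map (·.2)).Nodup)
    (hf : ∀ v ∈ d.values, ∀ p ∈ l, p.2 ∉ v) :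
    l.foldl (fun d p => d.modify p.1 [] (fun s => PySem.Set.add s p.2)) d
      = l.foldl (fun d p => d.modify p.1 [] (fun s => s ++ [p.2])) d := by
  induction l generalizing d with
  | nil => rfl
  | cons q t ih =>
      simp only [List.foldl_cons]
      have hmem : q.2 ∉ d.getD q.1 [] := by
        by_cases hc : d.contains q.1
        · exact hf _ (getD_mem_values hc) q (by simp)
        · simp [PySem.Dict.getD_of_not_contains _ _ (by simpa using hc)]
      have hq : PySem.Set.add (d.getD q.1 []) q.2 = d.getD q.1 [] ++ [q.2] := by
        simp [PySem.Set.add, PySem.Set.contains, hmem]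
      have hstep : d.modify q.1 [] (fun s => PySem.Set.add s q.2)
          = d.modify q.1 [] (fun s => s ++ [q.2]) := by
        simp [PySem.Dict.modify, hq]
      rw [hstep]
      apply ih
      · exact (List.nodup_cons.mp (by simpa using hn)).2
      · intro v hv p hp
        rcases PySem.Dict.mem_values_insert _ _ _ _ (by simpa [PySem.Dict.modify] using hv) with h1 | h1
        · subst h1
          simp only [List.mem_append, List.mem_singleton]
          rintro (h2 | h2)
          · by_cases hc : d.contains q.1
            · exact hf _ (getD_mem_values hc) p (List.mem_cons_of_mem _ hp) h2
            · simp [PySem.Dict.getD_of_not_contains _ _ (by simpa using hc)] at h2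
          · have : q.2 ∉ t.map (·.2) := (List.nodup_cons.mp (by simpa using hn)).1
            exact this (h2 ▸ List.mem_map_of_mem hp)
        · exact hf _ h1 p (List.mem_cons_of_mem _ hp)

-- indices in `enumerate` are strictly increasing, hence distinct
lemma nodup_fst_enumerate (xs : List Int) :
    ((PySem.List.enumerate xs 0).map (·.1)).Nodup := by
  have h := PySem.List.pairwise_lt_enumerate xs 0
  rw [List.Nodup, List.pairwise_map]
  exact h.imp (fun hlt => ne_of_lt hlt)

-- characterisation of A's result: distinct labels in first-occurrence order, each with its index list
lemma a_char (xs : List Int) :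
    components_array_to_dictionary xs
      = (PySem.Set.ofList xs).map (fun c =>
          (c, ((PySem.List.enumerate xs 0).filter (fun p => p.2 == c)).map (·.1))) := by
  unfold components_array_to_dictionary
  rw [PySem.List.foldl_congr_mem _ _
      (fun d i => d.modify (PySem.List.pyGetD xs i 0) [] (fun s => PySem.Set.add s i)) _
      (by
        intro acc i hi
        rw [PySem.List.mem_pyRange_one] at hi
        rw [PySem.List.pyGet?_eq_some_getElem xs hi.1 hi.2]
        simp only
        rw [aStep_eq_modify, PySem.List.pyGetD_eq_getElem xs 0 hi.1 hi.2])]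
  have e1 : (PySem.List.pyRange 0 (xs.length : Int) 1).foldl
      (fun (d : PySem.Dict Int (PySem.Set Int)) i =>
        d.modify (PySem.List.pyGetD xs i 0) [] (fun s => PySem.Set.add s i)) PySem.Dict.empty
    = ((PySem.List.enumerate xs 0).map (fun p => (p.2, p.1))).foldl
      (fun d p => d.modify p.1 [] (fun s => PySem.Set.add s p.2)) PySem.Dict.empty := by
    rw [PySem.List.enumerate_eq_map_pyRange xs 0, List.map_map, List.foldl_map]
    rfl
  rw [e1]
  rw [foldl_modify_add_eq_append _ _
      (by simpa [List.map_map, Function.comp] using nodup_fst_enumerate xs)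
      (by intro v hv; simp [PySem.Dict.values, PySem.Dict.empty] at hv)]
  have hnodup : (((PySem.List.enumerate xs 0).map (fun p => (p.2, p.1))).foldl
      (fun (d : PySem.Dict Int (PySem.Set Int)) p =>
        d.modify p.1 [] (fun s => s ++ [p.2])) PySem.Dict.empty).keys.Nodup := by
    apply PySem.Dict.nodup_keys_foldl_modify_key
    simp [PySem.Dict.keys_empty]
  rw [PySem.Dict.items_eq_map_keys _ hnodup []]
  have hkeys : (((PySem.List.enumerate xs 0).map (fun p => (p.2, p.1))).foldl
      (fun (d : PySem.Dict Int (PySem.Set Int)) p =>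
        d.modify p.1 [] (fun s => s ++ [p.2])) PySem.Dict.empty).keys = PySem.Set.ofList xs := by
    rw [PySem.Dict.keys_foldl_modify_key ((PySem.List.enumerate xs 0).map (fun p => (p.2, p.1)))
        (fun p => p.1) [] (fun d p s => s ++ [p.2]) PySem.Dict.empty]
    simp [List.map_map, Function.comp_def, PySem.Dict.keys_empty,
      PySem.List.map_snd_enumerate, PySem.Set.update, PySem.Set.ofList_eq_foldl]
  rw [hkeys]
  apply List.map_congr_left
  intro k _
  rw [PySem.Dict.getD_foldl_modify_append]
  simp [List.filter_map, List.map_map, Function.comp_def]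

-- ===== VERDICT (by name: the statement is the Claim_ definition above) =====
theorem components_array_to_dictionary_spec : Claim_equal_components_array_to_dictionary := by
  intro xs _
  unfold Spec_components_array_to_dictionary
  rw [a_char]
  unfold components_array_to_dictionary_alt
  have hlab : xs.foldl (fun ls c => if ls.contains c then ls else ls ++ [c]) []
      = PySem.Set.ofList xs := by
    rw [PySem.Set.ofList_eq_foldl]; rfl
  simp only [hlab]
  apply List.map_congr_left
  intro c _
  congr 1
  rw [PySem.Set.ofList_eq_self_of_nodup]
  exact (nodup_fst_enumerate xs).sublist (List.filter_sublist.map _)
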